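-- pv_equiv track=rewrite | github.com/wayneshix/bril | assignment/task3/loop_optimization.py | find_natural_loops
-- ===== SOURCE A (Python) =====
-- def get_predecessors(cfg, node):
--     preds = []
--     for n in cfg:
--         if node in cfg[n]:
--             preds.append(n)
--     return preds
--
-- def find_natural_loops(cfg, back_edges):
--     loops = []
--     for src, dest in back_edges:
--         loop_nodes = set()
--         stack = [src]
--         while stack:
--             n = stack.pop()
--             if n not in loop_nodes:
--                 loop_nodes.add(n)
--                 preds = get_predecessors(cfg, n)
--                 stack.extend(preds)
--         loops.append((dest, loop_nodes))
--     return loops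
-- ===== SOURCE B (Python) =====
-- def find_natural_loops(cfg, back_edges):
--     # Precompute the predecessor adjacency map once (O(V+E)), instead of
--     # rescanning the whole CFG for predecessors at every visited node.
--     preds = {}
--     for n in cfg:
--         for s in cfg[n]:
--             ps = preds.setdefault(s, [])
--             if n not in ps:
--                 ps.append(n)
--     loops = []
--     for src, dest in back_edges:
--         loop_nodes = set()
--         stack = [src]
--         while stack:
--             n = stack.pop()
--             if n not in loop_nodes:
--                 loop_nodes.add(n)
--                 stack.extend(preds.get(n, []))
--         loops.append((dest, loop_nodes))
--     return loops
-- ===== Notes on version B (the rewrite author's own statement) =====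
-- stated objective: faster
-- what changed: B builds a predecessor adjacency map in one pass over the CFG and then does each backward traversal with O(1) predecessor lookups, instead of A's full scan of every CFG entry (get_predecessors) at every visited node of every traversal.
import Mathlib
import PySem

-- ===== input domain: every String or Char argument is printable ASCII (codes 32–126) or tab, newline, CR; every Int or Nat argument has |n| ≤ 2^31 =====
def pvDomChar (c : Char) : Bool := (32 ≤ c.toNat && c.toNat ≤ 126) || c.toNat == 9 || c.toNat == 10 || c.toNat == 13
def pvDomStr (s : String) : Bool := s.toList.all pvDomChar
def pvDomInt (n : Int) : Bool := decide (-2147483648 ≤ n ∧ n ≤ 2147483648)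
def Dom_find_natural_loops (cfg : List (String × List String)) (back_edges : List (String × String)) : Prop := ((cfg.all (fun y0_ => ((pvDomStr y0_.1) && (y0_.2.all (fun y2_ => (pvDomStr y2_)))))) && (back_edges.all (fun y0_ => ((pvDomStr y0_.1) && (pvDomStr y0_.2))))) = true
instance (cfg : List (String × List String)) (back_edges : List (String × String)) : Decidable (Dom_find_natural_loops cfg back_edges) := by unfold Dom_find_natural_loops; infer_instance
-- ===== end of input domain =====

-- B replaces A's per-visited-node full scan of the CFG for predecessors by a predecessor
-- adjacency map built once, then runs the same backward worklist traversal per back edge (faster).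
-- Both ports read `cfg` through PySem.Dict.ofList, since the Python `cfg` is a dict.

-- ===== PORT A =====

-- termination helper for the worklist loops of both ports: visiting a fresh node
-- shrinks the set of unvisited elements of the fixed universe U
theorem pv_filter_visit_lt (U vis : List String) (n : String) (hU : n ∈ U) (hn : n ∉ vis) :
    (U.filter (fun x => !(PySem.Set.contains (PySem.Set.add vis n) x))).length
      < (U.filter (fun x => !(PySem.Set.contains vis x))).length := by
  have hadd : PySem.Set.add vis n = vis ++ [n] := PySem.Set.add_of_not_mem hn
  have h1 : (U.filter (fun x => !(PySem.Set.contains (PySem.Set.add vis n) x)))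
      = (U.filter (fun x => !(PySem.Set.contains vis x))).filter (fun x => !(x == n)) := by
    rw [List.filter_filter]
    apply List.filter_congr
    intro x _
    by_cases hx : x ∈ vis <;> by_cases hxe : x = n <;>
      simp [hadd, PySem.Set.contains_eq_listContains, hx, hxe]
  rw [h1]
  apply List.length_filter_lt_length_iff_exists.mpr
  exact ⟨n, List.mem_filter.mpr ⟨hU, by simp [PySem.Set.contains_eq_listContains, hn]⟩, by simp⟩

def pv_get_predecessors (cfg : PySem.Dict String (List String)) (node : String) : List String :=
  (PySem.Dict.items cfg).foldl
    (fun preds kv => if kv.2.contains node then preds ++ [kv.1] else preds) []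

theorem pv_get_predecessors_eq_filter (cfg : PySem.Dict String (List String)) (s : String) :
    pv_get_predecessors cfg s
      = ((PySem.Dict.items cfg).filter (fun kv => kv.2.contains s)).map Prod.fst := by
  unfold pv_get_predecessors
  simp only [PySem.List.foldl_append_if (fun kv : String × List String => kv.2.contains s) Prod.fst]
  simp

-- predecessors are keys of the dict (needed by the worklist hypotheses)
theorem pv_mem_get_predecessors (cfg : PySem.Dict String (List String)) (node x : String)
    (hx : x ∈ pv_get_predecessors cfg node) : ∃ kv ∈ PySem.Dict.items cfg, x = kv.1 := by
  rw [pv_get_predecessors_eq_filter] at hx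
  simp only [List.mem_map, List.mem_filter] at hx
  obtain ⟨kv, ⟨hkv, _⟩, rfl⟩ := hx
  exact ⟨kv, hkv, rfl⟩

-- the `while stack:` loop of A; the Lean stack's head is the Python list's END
-- (Python pops from the end), so extending with preds pushes them reversed
def pv_loop_collect (cfg : PySem.Dict String (List String)) (U : List String)
    (hU : ∀ kv ∈ PySem.Dict.items cfg, kv.1 ∈ U)
    (stack : List String) (vis : PySem.Set String)
    (hs : ∀ x ∈ stack, x ∈ U) : PySem.Set String :=
  match stack with
  | [] => vis
  | n :: rest =>
    if h : PySem.Set.contains vis n then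
      pv_loop_collect cfg U hU rest vis (fun x hx => hs x (List.mem_cons_of_mem _ hx))
    else
      pv_loop_collect cfg U hU ((pv_get_predecessors cfg n).reverse ++ rest) (PySem.Set.add vis n)
        (fun x hx => by
          rcases List.mem_append.mp hx with hx | hx
          · obtain ⟨kv, hkv, rfl⟩ := pv_mem_get_predecessors cfg n x (List.mem_reverse.mp hx)
            exact hU kv hkv
          · exact hs x (List.mem_cons_of_mem _ hx))
  termination_by ((U.filter (fun x => !(PySem.Set.contains vis x))).length, stack.length)
  decreasing_by
  · exact Prod.Lex.right _ (by simp)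
  · exact Prod.Lex.left _ _ (pv_filter_visit_lt U vis n (hs n (List.mem_cons_self))
      (by simpa [PySem.Set.contains_eq_listContains] using h))

def find_natural_loops (cfg : List (String × List String)) (back_edges : List (String × String)) : List (String × List String) :=
  let d := PySem.Dict.ofList cfg
  back_edges.foldl
    (fun loops sd =>
      loops ++ [(sd.2,
        pv_loop_collect d (sd.1 :: (PySem.Dict.items d).map Prod.fst)
          (fun kv hkv => List.mem_cons_of_mem _ (List.mem_map_of_mem hkv))
          [sd.1] PySem.Set.empty
          (fun x hx => by simp only [List.mem_singleton] at hx; exact hx ▸ List.mem_cons_self))])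
    []

-- ===== PORT B =====

-- one step of B's map building: ps = preds.setdefault(s, []); if n not in ps: ps.append(n)
def pv_bp_add (n : String) (pm : PySem.Dict String (List String)) (s : String) :
    PySem.Dict String (List String) :=
  if (PySem.Dict.getD pm s []).contains n then pm
  else PySem.Dict.insert pm s (PySem.Dict.getD pm s [] ++ [n])

def pv_build_preds (cfg : PySem.Dict String (List String)) : PySem.Dict String (List String) :=
  (PySem.Dict.items cfg).foldl (fun pm kv => kv.2.foldl (pv_bp_add kv.1) pm) PySem.Dict.empty

-- closure facts used by the worklist hypotheses of B's port
theorem pv_bp_inner_closure (P : String → Prop) (n : String) (succs : List String)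
    (pm : PySem.Dict String (List String))
    (h : ∀ s x, x ∈ PySem.Dict.getD pm s [] → P x) (hn : P n) :
    ∀ s x, x ∈ PySem.Dict.getD (succs.foldl (pv_bp_add n) pm) s [] → P x := by
  induction succs generalizing pm with
  | nil => exact h
  | cons t rest ih =>
    simp only [List.foldl_cons]
    refine ih (pv_bp_add n pm t) ?_
    intro s x hx
    unfold pv_bp_add at hx
    split at hx
    · exact h s x hx
    · rw [PySem.Dict.getD_insert] at hx
      split at hx
      · rcases List.mem_append.mp hx with hx | hx
        · exact h t x hx
        · simp only [List.mem_singleton] at hx; exact hx ▸ hn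
      · exact h s x hx

theorem pv_build_preds_closure (cfg : PySem.Dict String (List String)) (s x : String)
    (hx : x ∈ PySem.Dict.getD (pv_build_preds cfg) s []) :
    x ∈ (PySem.Dict.items cfg).map Prod.fst := by
  have main : ∀ (l : List (String × List String)) (pm : PySem.Dict String (List String)),
      (∀ s x, x ∈ PySem.Dict.getD pm s [] → x ∈ (PySem.Dict.items cfg).map Prod.fst) →
      (∀ kv ∈ l, kv.1 ∈ (PySem.Dict.items cfg).map Prod.fst) →
      ∀ s x, x ∈ PySem.Dict.getD (l.foldl (fun pm kv => kv.2.foldl (pv_bp_add kv.1) pm) pm) s [] →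
        x ∈ (PySem.Dict.items cfg).map Prod.fst := by
    intro l
    induction l with
    | nil => intro pm h _; exact h
    | cons kv rest ih =>
      intro pm h hl
      exact ih _ (pv_bp_inner_closure _ kv.1 kv.2 pm h (hl kv List.mem_cons_self))
        (fun kv' hkv' => hl kv' (List.mem_cons_of_mem _ hkv'))
  unfold pv_build_preds at hx
  exact main (PySem.Dict.items cfg) PySem.Dict.empty
    (by intro s x hx; rw [PySem.Dict.getD_empty] at hx; cases hx)
    (fun kv hkv => List.mem_map_of_mem hkv) s x hx

-- B's worklist loop: identical traversal, but predecessors come from the precomputed map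
def pv_loop_collect_alt (pm : PySem.Dict String (List String)) (U : List String)
    (hU : ∀ s x, x ∈ PySem.Dict.getD pm s [] → x ∈ U)
    (stack : List String) (vis : PySem.Set String)
    (hs : ∀ x ∈ stack, x ∈ U) : PySem.Set String :=
  match stack with
  | [] => vis
  | n :: rest =>
    if h : PySem.Set.contains vis n then
      pv_loop_collect_alt pm U hU rest vis (fun x hx => hs x (List.mem_cons_of_mem _ hx))
    else
      pv_loop_collect_alt pm U hU ((PySem.Dict.getD pm n []).reverse ++ rest) (PySem.Set.add vis n)
        (fun x hx => by
          rcases List.mem_append.mp hx with hx | hx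
          · exact hU n x (List.mem_reverse.mp hx)
          · exact hs x (List.mem_cons_of_mem _ hx))
  termination_by ((U.filter (fun x => !(PySem.Set.contains vis x))).length, stack.length)
  decreasing_by
  · exact Prod.Lex.right _ (by simp)
  · exact Prod.Lex.left _ _ (pv_filter_visit_lt U vis n (hs n (List.mem_cons_self))
      (by simpa [PySem.Set.contains_eq_listContains] using h))

def find_natural_loops_alt (cfg : List (String × List String)) (back_edges : List (String × String)) : List (String × List String) :=
  let d := PySem.Dict.ofList cfg
  let pm := pv_build_preds d
  back_edges.foldl
    (fun loops sd =>
      loops ++ [(sd.2,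
        pv_loop_collect_alt pm (sd.1 :: (PySem.Dict.items d).map Prod.fst)
          (fun s x hx => List.mem_cons_of_mem _ (pv_build_preds_closure d s x hx))
          [sd.1] PySem.Set.empty
          (fun x hx => by simp only [List.mem_singleton] at hx; exact hx ▸ List.mem_cons_self))])
    []

-- ===== PRECONDITION & SPEC =====
def Spec_find_natural_loops (cfg : List (String × List String)) (back_edges : List (String × String)) (out : List (String × List String)) : Prop := out = find_natural_loops_alt cfg back_edges
instance (cfg : List (String × List String)) (back_edges : List (String × String)) (out : List (String × List String)) : Decidable (Spec_find_natural_loops cfg back_edges out) := by unfold Spec_find_natural_loops; infer_instance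

-- ===== CLAIM (what is proved, stated in full; the proofs are below) =====
def Claim_equal_find_natural_loops : Prop := ∀ (cfg : List (String × List String)) (back_edges : List (String × String)), Dom_find_natural_loops cfg back_edges → Spec_find_natural_loops cfg back_edges (find_natural_loops cfg back_edges)

-- ===== LEMMAS AND PROOFS =====

-- what one inner fold of pv_build_preds does to a lookup
theorem pv_bp_inner_getD (n : String) (succs : List String)
    (pm : PySem.Dict String (List String)) (s : String) :
    PySem.Dict.getD (succs.foldl (pv_bp_add n) pm) s []
      = if succs.contains s && !((PySem.Dict.getD pm s []).contains n)
        then PySem.Dict.getD pm s [] ++ [n] else PySem.Dict.getD pm s [] := by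
  induction succs generalizing pm with
  | nil => simp
  | cons t rest ih =>
    by_cases hc : (PySem.Dict.getD pm t []).contains n
    · have hb : pv_bp_add n pm t = pm := by unfold pv_bp_add; rw [if_pos hc]
      rw [List.foldl_cons, hb, ih]
      by_cases hst : s = t
      · subst hst
        have hc' : n ∈ PySem.Dict.getD pm s [] := by simpa using hc
        simp [hc']
      · simp [hst]
    · have hb : pv_bp_add n pm t = PySem.Dict.insert pm t (PySem.Dict.getD pm t [] ++ [n]) := by
        unfold pv_bp_add; rw [if_neg hc]
      rw [List.foldl_cons, hb, ih]
      have hc' : n ∉ PySem.Dict.getD pm t [] := by simpa using hc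
      by_cases hst : s = t
      · subst hst
        simp [hc']
      · simp [PySem.Dict.getD_insert, hst]

-- what the whole map-building fold produces at a key, given distinct CFG keys
theorem pv_bp_outer_getD (l : List (String × List String))
    (pm : PySem.Dict String (List String)) (hnd : (l.map Prod.fst).Nodup)
    (hdis : ∀ kv ∈ l, ∀ s, ¬ ((PySem.Dict.getD pm s []).contains kv.1 = true)) (s : String) :
    PySem.Dict.getD (l.foldl (fun pm kv => kv.2.foldl (pv_bp_add kv.1) pm) pm) s []
      = PySem.Dict.getD pm s [] ++ (l.filter (fun kv => kv.2.contains s)).map Prod.fst := by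
  induction l generalizing pm with
  | nil => simp
  | cons kv rest ih =>
    simp only [List.foldl_cons]
    have h1 : ∀ s', PySem.Dict.getD (kv.2.foldl (pv_bp_add kv.1) pm) s' []
        = PySem.Dict.getD pm s' [] ++ (if kv.2.contains s' then [kv.1] else []) := by
      intro s'
      rw [pv_bp_inner_getD]
      have hd' : kv.1 ∉ PySem.Dict.getD pm s' [] := by
        simpa using hdis kv List.mem_cons_self s'
      by_cases hc : s' ∈ kv.2 <;> simp [hc, hd']
    have hnd' : (rest.map Prod.fst).Nodup := (List.nodup_cons.mp (by simpa using hnd)).2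
    have hhead : kv.1 ∉ rest.map Prod.fst := (List.nodup_cons.mp (by simpa using hnd)).1
    rw [ih _ hnd' ?_ , h1]
    · by_cases hc : s ∈ kv.2 <;>
        simp [hc, List.append_assoc]
    · intro kv' hkv' s'
      rw [h1]
      have hne : kv'.1 ≠ kv.1 := by
        intro he
        exact hhead (he ▸ List.mem_map_of_mem hkv')
      have hold : kv'.1 ∉ PySem.Dict.getD pm s' [] := by
        simpa using hdis kv' (List.mem_cons_of_mem _ hkv') s'
      by_cases hc : s' ∈ kv.2 <;> simp [hc, hold, hne]

-- the precomputed map agrees with A's per-node scan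
theorem pv_build_preds_getD_eq (cfg : PySem.Dict String (List String))
    (hnd : ((PySem.Dict.items cfg).map Prod.fst).Nodup) (s : String) :
    PySem.Dict.getD (pv_build_preds cfg) s [] = pv_get_predecessors cfg s := by
  unfold pv_build_preds
  rw [pv_bp_outer_getD _ _ hnd
    (by intro kv _ s'; rw [PySem.Dict.getD_empty]; simp),
    PySem.Dict.getD_empty, pv_get_predecessors_eq_filter]
  simp

theorem pv_loop_collect_alt_congr (pm : PySem.Dict String (List String)) (U : List String)
    (hU : ∀ s x, x ∈ PySem.Dict.getD pm s [] → x ∈ U) {s1 s2 : List String} (h : s1 = s2)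
    (vis : PySem.Set String) (hs1 : ∀ x ∈ s1, x ∈ U) (hs2 : ∀ x ∈ s2, x ∈ U) :
    pv_loop_collect_alt pm U hU s1 vis hs1 = pv_loop_collect_alt pm U hU s2 vis hs2 := by
  subst h; rfl

-- the two worklist loops agree when the map agrees with the scan
theorem pv_loop_collect_eq (cfg pm : PySem.Dict String (List String))
    (hpm : ∀ s, PySem.Dict.getD pm s [] = pv_get_predecessors cfg s)
    (U : List String) (hU1 : ∀ kv ∈ PySem.Dict.items cfg, kv.1 ∈ U)
    (hU2 : ∀ s x, x ∈ PySem.Dict.getD pm s [] → x ∈ U)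
    (stack : List String) (vis : PySem.Set String) (hs : ∀ x ∈ stack, x ∈ U) :
    pv_loop_collect cfg U hU1 stack vis hs = pv_loop_collect_alt pm U hU2 stack vis hs := by
  fun_induction pv_loop_collect cfg U hU1 stack vis hs with
  | case1 => rw [pv_loop_collect_alt]
  | case2 vis n rest hs1 h hs2 ih =>
    rw [pv_loop_collect_alt]
    rw [dif_pos h]
    exact ih
  | case3 vis n rest hs1 h hs2 ih =>
    rw [pv_loop_collect_alt]
    rw [dif_neg h]
    rw [ih]
    exact pv_loop_collect_alt_congr pm U hU2 (by rw [hpm]) _ _ _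

-- ===== VERDICT (by name: the statement is the Claim_ definition above) =====
theorem find_natural_loops_spec : Claim_equal_find_natural_loops := by
  intro cfg back_edges _
  unfold Spec_find_natural_loops find_natural_loops find_natural_loops_alt
  have hnd : ((PySem.Dict.items (PySem.Dict.ofList cfg)).map Prod.fst).Nodup := by
    simpa [PySem.Dict.keys] using PySem.Dict.nodup_keys_ofList cfg
  have hpm := pv_build_preds_getD_eq (PySem.Dict.ofList cfg) hnd
  apply PySem.List.foldl_congr_mem
  intro acc sd _
  have h := pv_loop_collect_eq (PySem.Dict.ofList cfg) (pv_build_preds (PySem.Dict.ofList cfg)) hpm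
    (sd.1 :: (PySem.Dict.items (PySem.Dict.ofList cfg)).map Prod.fst)
    (fun kv hkv => List.mem_cons_of_mem _ (List.mem_map_of_mem hkv))
    (fun s x hx => List.mem_cons_of_mem _ (pv_build_preds_closure (PySem.Dict.ofList cfg) s x hx))
    [sd.1] PySem.Set.empty
    (fun x hx => by simp only [List.mem_singleton] at hx; exact hx ▸ List.mem_cons_self)
  rw [h]
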